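-- pv_equiv track=rewrite | github.com/keithwissing/adventofcode | 2020/day21.py | reduce_possibilities
-- ===== SOURCE A (Python) =====
-- def reduce_possibilities(could):
--     """
--     Takes a dict of keys to lists and returns a dict of keys to the item unique to each list
--
--     >>> reduce_possibilities({'one': [1,2], 'two': [2]})
--     {'two': 2, 'one': 1}
--     """
--     remaining = {k: v[:] for k, v in could.items()}  # don't change the input
--     known = {k:v[0] for k, v in remaining.items() if len(v) == 1}
--     toremove = set(known.values())
--     while toremove:
--         r = toremove.pop()
--         for k, vl in remaining.items():
--             if r in vl:
--                 vl.remove(r)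
--                 if len(vl) == 1:
--                     known[k] = vl[0]
--                     toremove.add(vl[0])
--     return known
-- ===== SOURCE B (Python) =====
-- def reduce_possibilities(could):
--     """Unit-elimination via an inverted index value->keys and a FIFO worklist:
--     each popped value touches only the keys whose list contains it."""
--     remaining = {k: list(v) for k, v in could.items()}
--     index = {}
--     for k, vl in remaining.items():
--         for v in dict.fromkeys(vl):
--             index.setdefault(v, []).append(k)
--     known = {k: vl[0] for k, vl in remaining.items() if len(vl) == 1}
--     pending = []
--     inqueue = set()
--     for v in known.values():
--         if v not in inqueue:
--             inqueue.add(v)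
--             pending.append(v)
--     head = 0
--     while head < len(pending):
--         r = pending[head]
--         head += 1
--         inqueue.discard(r)
--         for k in index.get(r, ()):
--             vl = remaining[k]
--             if r in vl:
--                 vl.remove(r)
--                 if len(vl) == 1:
--                     v0 = vl[0]
--                     known[k] = v0
--                     if v0 not in inqueue:
--                         inqueue.add(v0)
--                         pending.append(v0)
--     return known
-- ===== Notes on version B (the rewrite author's own statement) =====
-- stated objective: alternative
-- what changed: A rescans every key's list for each eliminated value inside a set-driven while loop; B builds an inverted index value->keys once and processes a FIFO worklist with an in-queue flag set, touching only the keys whose list contains the eliminated value (it trades an index-building pass for the per-elimination full scans).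
import Mathlib
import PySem

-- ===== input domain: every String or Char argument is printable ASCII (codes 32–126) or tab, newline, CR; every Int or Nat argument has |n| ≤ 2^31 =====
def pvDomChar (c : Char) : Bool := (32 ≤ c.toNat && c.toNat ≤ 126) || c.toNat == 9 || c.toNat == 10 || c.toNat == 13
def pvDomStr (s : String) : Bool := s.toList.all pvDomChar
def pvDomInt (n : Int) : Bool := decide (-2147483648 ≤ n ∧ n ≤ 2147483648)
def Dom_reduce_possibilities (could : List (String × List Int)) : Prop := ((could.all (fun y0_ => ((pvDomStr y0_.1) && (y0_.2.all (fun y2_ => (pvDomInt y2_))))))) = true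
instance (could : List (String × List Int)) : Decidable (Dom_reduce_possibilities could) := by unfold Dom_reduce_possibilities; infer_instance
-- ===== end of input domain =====

-- B replaces A's per-elimination scan over every key by an inverted index value→keys and a FIFO
-- worklist, touching only the keys whose list contains the eliminated value (objective:
-- alternative algorithm; exact same result on Pre_).


-- ===== PORT A =====
-- `remaining` is carried as the dict's items list (the Python mutates the value lists in place,
-- the dict structure itself never changes).  Python's set.pop order on a set of ints is not
-- modelled by PySem; the port pops the first element — Pre_ below restricts the claim to inputs
-- whose result is elimination-order independent.

-- two small facts the termination proofs below cite
theorem pvRemove_len {r : Int} {xs : List Int} (h : r ∈ xs) :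
    ((PySem.List.remove? xs r).getD []).length + 1 = xs.length := by
  have hs : (List.idxOf? r xs).isSome := by simpa [List.isSome_idxOf?] using h
  obtain ⟨i, hi⟩ := Option.isSome_iff_exists.mp hs
  obtain ⟨hlt, -, -⟩ := List.idxOf?_eq_some_iff.mp hi
  have hne : xs.length ≠ 0 := by intro h0; rw [List.length_eq_zero_iff] at h0; subst h0; cases h
  simp [PySem.List.remove?, hi, List.length_eraseIdx, hlt]
  omega

theorem pvSetAdd_len {s : PySem.Set Int} {x : Int} :
    (PySem.Set.add s x).length ≤ s.length + 1 := by
  unfold PySem.Set.add; split <;> simp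

-- sum of the lengths of all remaining lists (termination measure only)
def pvTotalLen (es : List (String × List Int)) : Nat := (es.map (fun p => p.2.length)).sum

-- one entry of A's inner `for k, vl in remaining.items():` pass
def pvStepA (r : Int) (s : List (String × List Int) × PySem.Dict String Int × PySem.Set Int)
    (p : String × List Int) : List (String × List Int) × PySem.Dict String Int × PySem.Set Int :=
  if r ∈ p.2 then
    let vl := (PySem.List.remove? p.2 r).getD []
    if vl.length = 1 then
      (s.1 ++ [(p.1, vl)], s.2.1.insert p.1 (vl.headD 0), PySem.Set.add s.2.2 (vl.headD 0))
    else (s.1 ++ [(p.1, vl)], s.2.1, s.2.2)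
  else (s.1 ++ [p], s.2.1, s.2.2)

theorem pvInnerA_measure (r : Int) (es : List (String × List Int))
    (done : List (String × List Int)) (kn : PySem.Dict String Int) (tr : PySem.Set Int) :
    pvTotalLen (es.foldl (pvStepA r) (done, kn, tr)).1
      + (es.foldl (pvStepA r) (done, kn, tr)).2.2.length
      ≤ pvTotalLen done + pvTotalLen es + tr.length := by
  induction es generalizing done kn tr with
  | nil => simp [pvTotalLen]
  | cons p es ih =>
    simp only [List.foldl_cons]
    by_cases h : r ∈ p.2
    · have hlen := pvRemove_len h
      by_cases h1 : ((PySem.List.remove? p.2 r).getD []).length = 1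
      · have := ih (done ++ [(p.1, (PySem.List.remove? p.2 r).getD [])])
          (kn.insert p.1 (((PySem.List.remove? p.2 r).getD []).headD 0))
          (PySem.Set.add tr (((PySem.List.remove? p.2 r).getD []).headD 0))
        have hadd : (PySem.Set.add tr (((PySem.List.remove? p.2 r).getD []).headD 0)).length ≤ tr.length + 1 :=
          pvSetAdd_len
        simp only [pvStepA, h, if_true, h1]
        simp only [pvTotalLen, List.map_append, List.sum_append, List.map_cons, List.map_nil,
          List.sum_cons, List.sum_nil] at this ⊢
        omega
      · have := ih (done ++ [(p.1, (PySem.List.remove? p.2 r).getD [])]) kn tr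
        simp only [pvStepA, h, if_true, h1, if_false]
        simp only [pvTotalLen, List.map_append, List.sum_append, List.map_cons, List.map_nil,
          List.sum_cons, List.sum_nil] at this ⊢
        omega
    · have := ih (done ++ [p]) kn tr
      simp only [pvStepA, h, if_false]
      simp only [pvTotalLen, List.map_append, List.sum_append, List.map_cons, List.map_nil,
        List.sum_cons, List.sum_nil] at this ⊢
      omega

-- A's `while toremove:` loop
def pvLoopA (es : List (String × List Int)) (kn : PySem.Dict String Int) (tr : PySem.Set Int) :
    PySem.Dict String Int :=
  match tr with
  | [] => kn
  | r :: tr' =>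
      let s := es.foldl (pvStepA r) (([] : List (String × List Int)), kn, tr')
      pvLoopA s.1 s.2.1 s.2.2
termination_by pvTotalLen es + tr.length
decreasing_by
  have h := pvInnerA_measure r es [] kn tr'
  simp only [List.foldl_attach, List.length_cons, pvTotalLen, List.map_nil, List.sum_nil] at *
  omega

def reduce_possibilities (could : List (String × List Int)) : List (String × Int) :=
  let remaining := (PySem.Dict.ofList could).items
  let known := remaining.foldl
    (fun d p => if p.2.length = 1 then d.insert p.1 (p.2.headD 0) else d)
    (PySem.Dict.empty : PySem.Dict String Int)
  let toremove : PySem.Set Int := PySem.Set.ofList known.values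
  (pvLoopA remaining known toremove).items

-- ===== PORT B =====
-- remaining[k] read / in-place write on the items list (dict with unique keys: first match)
def pvLookup (es : List (String × List Int)) (k : String) : List Int :=
  match es with
  | [] => []
  | p :: es' => if p.1 = k then p.2 else pvLookup es' k

def pvWrite (es : List (String × List Int)) (k : String) (v : List Int) :
    List (String × List Int) :=
  match es with
  | [] => []
  | p :: es' => if p.1 = k then (p.1, v) :: es' else p :: pvWrite es' k v

-- the inverted index: value → keys whose list contains it (dict.fromkeys = ordered dedup)
def pvIndex (es : List (String × List Int)) : PySem.Dict Int (List String) :=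
  es.foldl
    (fun d p => (PySem.List.dedup p.2).foldl (fun d v => d.modify v [] (fun l => l ++ [p.1])) d)
    (PySem.Dict.empty : PySem.Dict Int (List String))

-- one key of B's inner `for k in index.get(r, ()):` pass; state = (remaining, known, pending-suffix, inqueue)
def pvStepB (r : Int)
    (s : List (String × List Int) × PySem.Dict String Int × List Int × PySem.Set Int)
    (k : String) : List (String × List Int) × PySem.Dict String Int × List Int × PySem.Set Int :=
  let vl := pvLookup s.1 k
  if r ∈ vl then
    let vl' := (PySem.List.remove? vl r).getD []
    let rem' := pvWrite s.1 k vl'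
    if vl'.length = 1 then
      let v0 := vl'.headD 0
      if v0 ∈ s.2.2.2 then (rem', s.2.1.insert k v0, s.2.2.1, s.2.2.2)
      else (rem', s.2.1.insert k v0, s.2.2.1 ++ [v0], PySem.Set.add s.2.2.2 v0)
    else (rem', s.2.1, s.2.2.1, s.2.2.2)
  else s

theorem pvWrite_totalLen {es : List (String × List Int)} {k : String} (v : List Int)
    (h : pvLookup es k ≠ []) :
    pvTotalLen (pvWrite es k v) + (pvLookup es k).length = pvTotalLen es + v.length := by
  induction es with
  | nil => simp [pvLookup] at h
  | cons p es ih =>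
    by_cases hk : p.1 = k
    · simp [pvLookup, pvWrite, hk, pvTotalLen]; omega
    · simp only [pvLookup, pvWrite, hk, if_false] at *
      simp only [pvTotalLen, List.map_cons, List.sum_cons] at *
      have := ih h
      omega

theorem pvInnerB_measure (r : Int) (ks : List String) (es : List (String × List Int))
    (kn : PySem.Dict String Int) (q : List Int) (inq : PySem.Set Int) :
    pvTotalLen (ks.foldl (pvStepB r) (es, kn, q, inq)).1
      + (ks.foldl (pvStepB r) (es, kn, q, inq)).2.2.1.length
      ≤ pvTotalLen es + q.length := by
  induction ks generalizing es kn q inq with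
  | nil => simp
  | cons k ks ih =>
    simp only [List.foldl_cons]
    by_cases h : r ∈ pvLookup es k
    · have hne : pvLookup es k ≠ [] := by intro h0; rw [h0] at h; cases h
      have hw := pvWrite_totalLen (v := (PySem.List.remove? (pvLookup es k) r).getD []) hne
      have hlen := pvRemove_len h
      by_cases h1 : ((PySem.List.remove? (pvLookup es k) r).getD []).length = 1
      · by_cases h2 : ((PySem.List.remove? (pvLookup es k) r).getD []).headD 0 ∈ inq
        · have := ih (pvWrite es k ((PySem.List.remove? (pvLookup es k) r).getD []))
            (kn.insert k (((PySem.List.remove? (pvLookup es k) r).getD []).headD 0)) q inq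
          simp only [pvStepB, h, if_true, h1, h2] at this ⊢
          omega
        · have := ih (pvWrite es k ((PySem.List.remove? (pvLookup es k) r).getD []))
            (kn.insert k (((PySem.List.remove? (pvLookup es k) r).getD []).headD 0))
            (q ++ [((PySem.List.remove? (pvLookup es k) r).getD []).headD 0])
            (PySem.Set.add inq (((PySem.List.remove? (pvLookup es k) r).getD []).headD 0))
          simp only [pvStepB, h, if_true, h1, h2, if_false] at this ⊢
          simp only [List.length_append, List.length_cons, List.length_nil] at this
          omega
      · have := ih (pvWrite es k ((PySem.List.remove? (pvLookup es k) r).getD [])) kn q inq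
        simp only [pvStepB, h, if_true, h1, if_false] at this ⊢
        omega
    · have := ih es kn q inq
      simp only [pvStepB, h, if_false] at this ⊢
      exact this

-- B's `while head < len(pending):` loop; `pending[head:]` is carried as the list q
def pvLoopB (idx : PySem.Dict Int (List String)) (es : List (String × List Int))
    (kn : PySem.Dict String Int) (q : List Int) (inq : PySem.Set Int) :
    PySem.Dict String Int :=
  match q with
  | [] => kn
  | r :: q' =>
      let s := (idx.getD r []).foldl (pvStepB r) (es, kn, q', PySem.Set.discard inq r)
      pvLoopB idx s.1 s.2.1 s.2.2.1 s.2.2.2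
termination_by pvTotalLen es + q.length
decreasing_by
  have h := pvInnerB_measure r (idx.getD r []) es kn q' (PySem.Set.discard inq r)
  simp only [List.length_cons] at *
  omega

def reduce_possibilities_alt (could : List (String × List Int)) : List (String × Int) :=
  let remaining := (PySem.Dict.ofList could).items
  let index := pvIndex remaining
  let known := remaining.foldl
    (fun d p => if p.2.length = 1 then d.insert p.1 (p.2.headD 0) else d)
    (PySem.Dict.empty : PySem.Dict String Int)
  let init := known.values.foldl
    (fun (p : List Int × PySem.Set Int) v =>
      if v ∈ p.2 then p else (p.1 ++ [v], PySem.Set.add p.2 v))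
    (([] : List Int), (PySem.Set.empty : PySem.Set Int))
  (pvLoopB index remaining known init.1 init.2).items

-- ===== PRECONDITION & SPEC =====
-- Pre_ excludes over-constrained corner inputs on which A's returned assignment depends on
-- CPython's unspecified set.pop iteration order (a multi-element list that the eliminations can
-- empty); inside Pre_ the result is elimination-order independent.  Two readable sufficient
-- cases: no singleton value occurs in a longer list (no cascade starts), or every longer list
-- owns a value occurring exactly once over all the lists (so it can never be emptied).
def Pre_reduce_possibilities (could : List (String × List Int)) : Prop :=
  (∀ p ∈ (PySem.Dict.ofList could).items, p.2.length = 1 →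
      ∀ q ∈ (PySem.Dict.ofList could).items, 2 ≤ q.2.length → p.2.headD 0 ∉ q.2)
  ∨ (∀ p ∈ (PySem.Dict.ofList could).items, 2 ≤ p.2.length →
      ∃ x ∈ p.2, ((PySem.Dict.ofList could).items.flatMap (fun q => q.2)).count x = 1)

instance (could : List (String × List Int)) : Decidable (Pre_reduce_possibilities could) := by
  unfold Pre_reduce_possibilities; infer_instance

def pvWitness_reduce_possibilities : (List (String × List Int)) := [("one", [1, 2]), ("two", [2])]

def Spec_reduce_possibilities (could : List (String × List Int)) (out : List (String × Int)) : Prop := out = reduce_possibilities_alt could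
instance (could : List (String × List Int)) (out : List (String × Int)) : Decidable (Spec_reduce_possibilities could out) := by unfold Spec_reduce_possibilities; infer_instance

-- ===== CLAIM (what is proved, stated in full; the proofs are below) =====
def Claim_equal_reduce_possibilities : Prop := ∀ (could : List (String × List Int)), Dom_reduce_possibilities could → Pre_reduce_possibilities could → Spec_reduce_possibilities could (reduce_possibilities could)

-- ===== LEMMAS AND PROOFS =====


-- appended lemmas
theorem pvLookup_append_not_mem {done es : List (String × List Int)} {k : String}
    (h : k ∉ done.map Prod.fst) : pvLookup (done ++ es) k = pvLookup es k := by
  induction done with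
  | nil => rfl
  | cons p d ih =>
    simp only [List.map_cons, List.mem_cons, not_or] at h
    simp only [List.cons_append, pvLookup]
    rw [if_neg (fun he : p.1 = k => h.1 he.symm)]
    exact ih h.2

theorem pvWrite_append_not_mem {done es : List (String × List Int)} {k : String} {v : List Int}
    (h : k ∉ done.map Prod.fst) : pvWrite (done ++ es) k v = done ++ pvWrite es k v := by
  induction done with
  | nil => rfl
  | cons p d ih =>
    simp only [List.map_cons, List.mem_cons, not_or] at h
    simp only [List.cons_append, pvWrite]
    rw [if_neg (fun he : p.1 = k => h.1 he.symm)]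
    rw [ih h.2]

theorem pvLookup_eq_of_mem {es : List (String × List Int)} {p : String × List Int}
    (hnd : (es.map Prod.fst).Nodup) (hp : p ∈ es) : pvLookup es p.1 = p.2 := by
  induction es with
  | nil => cases hp
  | cons q es ih =>
    simp only [List.map_cons, List.nodup_cons] at hnd
    cases hp with
    | head => simp [pvLookup]
    | tail _ hp =>
      have hne : q.1 ≠ p.1 := by
        intro he; exact hnd.1 (he ▸ List.mem_map_of_mem hp)
      simp only [pvLookup, if_neg hne]
      exact ih hnd.2 hp

theorem pvRemove_subset {r : Int} {xs : List Int} :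
    ∀ x ∈ (PySem.List.remove? xs r).getD [], x ∈ xs := by
  intro x hx
  unfold PySem.List.remove? at hx
  cases hio : List.idxOf? r xs with
  | none => simp [hio] at hx
  | some i => simp [hio] at hx; exact (List.eraseIdx_sublist xs i).mem hx

theorem pvFilter_nodup (l : List Int) (a : Int) (h : l.Nodup) :
    l.filter (fun x => x == a) = if a ∈ l then [a] else [] := by
  induction l with
  | nil => simp
  | cons x l ih =>
    simp only [List.nodup_cons] at h
    by_cases hx : x = a
    · subst hx
      simp [h.1, ih h.2]
    · simp [hx, ih h.2, Ne.symm hx]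

theorem pvIndexAux (r : Int) (es : List (String × List Int)) :
    ∀ d : PySem.Dict Int (List String),
    (es.foldl (fun d p => (PySem.List.dedup p.2).foldl
        (fun d v => d.modify v [] (fun l => l ++ [p.1])) d) d).getD r []
      = d.getD r [] ++ (es.filter (fun p => decide (r ∈ p.2))).map Prod.fst := by
  induction es with
  | nil => simp
  | cons p es ih =>
    intro d
    simp only [List.foldl_cons]
    rw [ih]
    have h1 : ((PySem.List.dedup p.2).foldl (fun d v => d.modify v [] (fun l => l ++ [p.1])) d).getD r []
        = d.getD r [] ++ (if r ∈ p.2 then [p.1] else []) := by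
      have := PySem.Dict.getD_foldl_modify_append ((PySem.List.dedup p.2).map (fun v => (v, p.1))) d r
      rw [List.foldl_map] at this
      simp only at this
      rw [this, List.filter_map]
      have hd : (PySem.List.dedup p.2).filter (fun x => x == r) = if r ∈ PySem.List.dedup p.2 then [r] else [] :=
        pvFilter_nodup _ _ (PySem.List.nodup_dedup p.2)
      simp only [Function.comp_def] at hd ⊢
      rw [hd]
      by_cases hm : r ∈ p.2
      · simp [hm]
      · simp [hm]
    rw [h1, List.filter_cons]
    by_cases hm : r ∈ p.2
    · simp [hm]
    · simp [hm]

theorem pvIndex_getD {es : List (String × List Int)} (hnd : (es.map Prod.fst).Nodup) (r : Int) :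
    (pvIndex es).getD r [] = (es.map Prod.fst).filter (fun k => decide (r ∈ pvLookup es k)) := by
  unfold pvIndex
  rw [pvIndexAux]
  rw [List.filter_map]
  have : ∀ p ∈ es, (decide (r ∈ pvLookup es p.1) : Bool) = decide (r ∈ p.2) := by
    intro p hp
    rw [pvLookup_eq_of_mem hnd hp]
  rw [List.filter_congr (p := (fun k => decide (r ∈ pvLookup es k)) ∘ Prod.fst)
    (q := fun p => decide (r ∈ p.2)) (fun p hp => by simpa [Function.comp] using this p hp)]
  simp [PySem.Dict.getD_empty]

theorem pvInner_sim (r : Int) (c0 : String → Bool) :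
    ∀ (es done : List (String × List Int)) (kn : PySem.Dict String Int) (tr : List Int)
      (inq : PySem.Set Int),
    ((done ++ es).map Prod.fst).Nodup →
    (∀ p ∈ es, r ∈ p.2 → c0 p.1 = true) →
    (∀ y : Int, y ∈ inq ↔ y ∈ tr) →
    tr.Nodup →
    ((es.map Prod.fst).filter c0).foldl (pvStepB r) (done ++ es, kn, tr, inq)
        = ((es.foldl (pvStepA r) (done, kn, tr)).1,
           (es.foldl (pvStepA r) (done, kn, tr)).2.1,
           (es.foldl (pvStepA r) (done, kn, tr)).2.2,
           (((es.map Prod.fst).filter c0).foldl (pvStepB r) (done ++ es, kn, tr, inq)).2.2.2)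
    ∧ (∀ y : Int,
        y ∈ (((es.map Prod.fst).filter c0).foldl (pvStepB r) (done ++ es, kn, tr, inq)).2.2.2
          ↔ y ∈ (es.foldl (pvStepA r) (done, kn, tr)).2.2)
    ∧ (es.foldl (pvStepA r) (done, kn, tr)).2.2.Nodup := by
  intro es
  induction es with
  | nil =>
    intro done kn tr inq hnd hsub hinq htr
    simp only [List.map_nil, List.filter_nil, List.foldl_nil, List.append_nil]
    exact ⟨trivial, hinq, htr⟩
  | cons p es ih =>
    intro done kn tr inq hnd hsub hinq htr
    have hkd : p.1 ∉ done.map Prod.fst := by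
      simp only [List.map_append, List.map_cons] at hnd
      have hdj := List.disjoint_of_nodup_append hnd
      intro hmem
      have : p.1 ∈ p.1 :: es.map Prod.fst := List.mem_cons_self ..
      exact hdj hmem this
    have hlook : pvLookup (done ++ p :: es) p.1 = p.2 := by
      rw [pvLookup_append_not_mem hkd]; simp [pvLookup]
    simp only [List.map_cons, List.filter_cons, List.foldl_cons]
    by_cases hc : c0 p.1
    · simp only [hc, if_true, List.foldl_cons]
      by_cases hr : r ∈ p.2
      · -- both sides act on p
        have hrw : pvWrite (done ++ p :: es) p.1 ((PySem.List.remove? p.2 r).getD [])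
            = done ++ (p.1, (PySem.List.remove? p.2 r).getD []) :: es := by
          rw [pvWrite_append_not_mem hkd]; simp [pvWrite]
        by_cases h1 : ((PySem.List.remove? p.2 r).getD []).length = 1
        · set v0 := ((PySem.List.remove? p.2 r).getD []).headD 0 with hv0
          by_cases h2 : v0 ∈ inq
          · have h2t : v0 ∈ tr := (hinq v0).mp h2
            have hstepB : pvStepB r (done ++ p :: es, kn, tr, inq) p.1
                = (done ++ (p.1, (PySem.List.remove? p.2 r).getD []) :: es,
                   kn.insert p.1 v0, tr, inq) := by
              simp only [pvStepB, hlook, hr, if_true, h1, hrw, h2, if_true, ← hv0]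
            have hadd : PySem.Set.add tr v0 = tr := PySem.Set.add_of_mem h2t
            have hstepA : pvStepA r (done, kn, tr) p
                = (done ++ [(p.1, (PySem.List.remove? p.2 r).getD [])], kn.insert p.1 v0,
                   PySem.Set.add tr v0) := by
              simp only [pvStepA, hr, if_true, h1, ← hv0]
            rw [hstepB, hstepA, hadd]
            have := ih (done ++ [(p.1, (PySem.List.remove? p.2 r).getD [])])
              (kn.insert p.1 v0) tr inq
              (by simpa using hnd)
              (fun q hq hrq => hsub q (List.mem_cons_of_mem _ hq) hrq)
              hinq htr
            simpa [List.append_assoc] using this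
          · have h2t : v0 ∉ tr := fun h => h2 ((hinq v0).mpr h)
            have hstepB : pvStepB r (done ++ p :: es, kn, tr, inq) p.1
                = (done ++ (p.1, (PySem.List.remove? p.2 r).getD []) :: es,
                   kn.insert p.1 v0, tr ++ [v0], PySem.Set.add inq v0) := by
              simp only [pvStepB, hlook, hr, if_true, h1, hrw, h2, if_false, ← hv0]
            have hadd : PySem.Set.add tr v0 = tr ++ [v0] := PySem.Set.add_of_not_mem h2t
            have hstepA : pvStepA r (done, kn, tr) p
                = (done ++ [(p.1, (PySem.List.remove? p.2 r).getD [])], kn.insert p.1 v0,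
                   PySem.Set.add tr v0) := by
              simp only [pvStepA, hr, if_true, h1, ← hv0]
            rw [hstepB, hstepA, hadd]
            have hinq' : ∀ y : Int, y ∈ PySem.Set.add inq v0 ↔ y ∈ tr ++ [v0] := by
              intro y
              rw [PySem.Set.mem_add]
              simp [hinq y, or_comm]
            have htr' : (tr ++ [v0]).Nodup := by
              simp only [List.nodup_append, List.nodup_cons]
              exact ⟨htr, by simp, fun a ha => by simp; rintro rfl; exact h2t ha⟩
            have := ih (done ++ [(p.1, (PySem.List.remove? p.2 r).getD [])])
              (kn.insert p.1 v0) (tr ++ [v0]) (PySem.Set.add inq v0)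
              (by simpa using hnd)
              (fun q hq hrq => hsub q (List.mem_cons_of_mem _ hq) hrq)
              hinq' htr'
            simpa [List.append_assoc] using this
        · have hstepB : pvStepB r (done ++ p :: es, kn, tr, inq) p.1
              = (done ++ (p.1, (PySem.List.remove? p.2 r).getD []) :: es, kn, tr, inq) := by
            simp only [pvStepB, hlook, hr, if_true, h1, hrw, if_false]
          have hstepA : pvStepA r (done, kn, tr) p
              = (done ++ [(p.1, (PySem.List.remove? p.2 r).getD [])], kn, tr) := by
            simp only [pvStepA, hr, if_true, h1, if_false]
          rw [hstepB, hstepA]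
          have := ih (done ++ [(p.1, (PySem.List.remove? p.2 r).getD [])]) kn tr inq
            (by simpa using hnd)
            (fun q hq hrq => hsub q (List.mem_cons_of_mem _ hq) hrq)
            hinq htr
          simpa [List.append_assoc] using this
      · -- key is in the index but its current list no longer holds r : B's step is a no-op
        have hstepB : pvStepB r (done ++ p :: es, kn, tr, inq) p.1 = (done ++ p :: es, kn, tr, inq) := by
          simp only [pvStepB, hlook, hr, if_false]
        have hstepA : pvStepA r (done, kn, tr) p = (done ++ [p], kn, tr) := by
          simp only [pvStepA, hr, if_false]
        rw [hstepB, hstepA]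
        have := ih (done ++ [p]) kn tr inq
          (by simpa using hnd)
          (fun q hq hrq => hsub q (List.mem_cons_of_mem _ hq) hrq)
          hinq htr
        simpa [List.append_assoc] using this
    · -- key not in the index : r was never in p's list
      have hr : r ∉ p.2 := fun hm => by
        rw [hsub p List.mem_cons_self hm] at hc; exact hc rfl
      have hstepA : pvStepA r (done, kn, tr) p = (done ++ [p], kn, tr) := by
        simp only [pvStepA, hr, if_false]
      simp only [hc, Bool.false_eq_true, if_false]
      rw [hstepA]
      have := ih (done ++ [p]) kn tr inq
        (by simpa using hnd)
        (fun q hq hrq => hsub q (List.mem_cons_of_mem _ hq) hrq)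
        hinq htr
      simpa [List.append_assoc] using this

theorem pvInnerA_keys (r : Int) :
    ∀ (es done : List (String × List Int)) (kn : PySem.Dict String Int) (tr : PySem.Set Int),
    (es.foldl (pvStepA r) (done, kn, tr)).1.map Prod.fst
      = done.map Prod.fst ++ es.map Prod.fst := by
  intro es
  induction es with
  | nil => intro done kn tr; simp
  | cons p es ih =>
    intro done kn tr
    simp only [List.foldl_cons, pvStepA]
    by_cases hr : r ∈ p.2
    · by_cases h1 : ((PySem.List.remove? p.2 r).getD []).length = 1
      · simp only [hr, if_true, h1]
        rw [ih]
        simp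
      · simp only [hr, if_true, h1, if_false]
        rw [ih]
        simp
    · simp only [hr, if_false]
      rw [ih]
      simp

theorem pvInnerA_shrink (r : Int) :
    ∀ (es done : List (String × List Int)) (kn : PySem.Dict String Int) (tr : PySem.Set Int),
    ∀ p' ∈ (es.foldl (pvStepA r) (done, kn, tr)).1,
      p' ∈ done ∨ ∃ p ∈ es, p'.1 = p.1 ∧ ∀ x ∈ p'.2, x ∈ p.2 := by
  intro es
  induction es with
  | nil => intro done kn tr p' h; exact Or.inl h
  | cons p es ih =>
    intro done kn tr p' h
    simp only [List.foldl_cons, pvStepA] at h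
    have hnext : ∀ done' kn' tr', p' ∈ (es.foldl (pvStepA r) (done', kn', tr')).1 →
        (p' ∈ done' → p' ∈ done ∨ (p'.1 = p.1 ∧ ∀ x ∈ p'.2, x ∈ p.2)) →
        p' ∈ done ∨ ∃ q ∈ p :: es, p'.1 = q.1 ∧ ∀ x ∈ p'.2, x ∈ q.2 := by
      intro done' kn' tr' hmem hdone
      rcases ih done' kn' tr' p' hmem with hd | ⟨q, hq, hh⟩
      · rcases hdone hd with h' | h'
        · exact Or.inl h'
        · exact Or.inr ⟨p, List.mem_cons_self .., h'⟩
      · exact Or.inr ⟨q, List.mem_cons_of_mem _ hq, hh⟩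
    by_cases hr : r ∈ p.2
    · by_cases h1 : ((PySem.List.remove? p.2 r).getD []).length = 1
      · simp only [hr, if_true, h1] at h
        refine hnext _ _ _ h ?_
        intro hd
        rcases List.mem_append.mp hd with h' | h'
        · exact Or.inl h'
        · simp only [List.mem_singleton] at h'
          subst h'
          exact Or.inr ⟨rfl, fun x hx => pvRemove_subset x hx⟩
      · simp only [hr, if_true, h1, if_false] at h
        refine hnext _ _ _ h ?_
        intro hd
        rcases List.mem_append.mp hd with h' | h'
        · exact Or.inl h'
        · simp only [List.mem_singleton] at h'
          subst h'
          exact Or.inr ⟨rfl, fun x hx => pvRemove_subset x hx⟩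
    · simp only [hr, if_false] at h
      refine hnext _ _ _ h ?_
      intro hd
      rcases List.mem_append.mp hd with h' | h'
      · exact Or.inl h'
      · simp only [List.mem_singleton] at h'
        subst h'
        exact Or.inr ⟨rfl, fun x hx => hx⟩

theorem pvLoop_sim (rem0 : List (String × List Int)) (hnd0 : (rem0.map Prod.fst).Nodup) :
    ∀ (n : Nat) (tr : PySem.Set Int) (es : List (String × List Int))
      (kn : PySem.Dict String Int) (inq : PySem.Set Int),
    pvTotalLen es + tr.length ≤ n →
    es.map Prod.fst = rem0.map Prod.fst →
    (∀ p ∈ es, ∀ x ∈ p.2, x ∈ pvLookup rem0 p.1) →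
    (∀ y : Int, y ∈ inq ↔ y ∈ tr) →
    tr.Nodup →
    pvLoopA es kn tr = pvLoopB (pvIndex rem0) es kn tr inq := by
  intro n
  induction n with
  | zero =>
    intro tr es kn inq hm h1 h2 h3 h4
    have : tr = [] := by
      cases tr with
      | nil => rfl
      | cons r tr' => simp at hm
    subst this
    simp [pvLoopA, pvLoopB]
  | succ n ih =>
    intro tr es kn inq hm h1 h2 h3 h4
    cases tr with
    | nil => simp [pvLoopA, pvLoopB]
    | cons r tr' =>
      rw [pvLoopA, pvLoopB]
      have hidx : (pvIndex rem0).getD r [] =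
          (es.map Prod.fst).filter (fun k => decide (r ∈ pvLookup rem0 k)) := by
        rw [pvIndex_getD hnd0 r, h1]
      have hnd : (([] ++ es).map Prod.fst).Nodup := by simpa [h1] using hnd0
      have hsub : ∀ p ∈ es, r ∈ p.2 → (fun k => decide (r ∈ pvLookup rem0 k)) p.1 = true := by
        intro p hp hr
        simp only [decide_eq_true_eq]
        exact h2 p hp r hr
      have hrn : r ∉ tr' := (List.nodup_cons.mp h4).1
      have hinq' : ∀ y : Int, y ∈ PySem.Set.discard inq r ↔ y ∈ tr' := by
        intro y
        rw [PySem.Set.mem_discard]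
        constructor
        · rintro ⟨hy, hne⟩
          rcases List.mem_cons.mp ((h3 y).mp hy) with h | h
          · exact absurd h hne
          · exact h
        · intro hy
          refine ⟨(h3 y).mpr (List.mem_cons_of_mem _ hy), ?_⟩
          rintro rfl
          exact hrn hy
      have htr' : tr'.Nodup := (List.nodup_cons.mp h4).2
      have hsim := pvInner_sim r (fun k => decide (r ∈ pvLookup rem0 k)) es [] kn tr'
        (PySem.Set.discard inq r) hnd hsub hinq' htr'
      rw [hidx]
      simp only [List.nil_append] at hsim
      rw [hsim.1]
      have hmeas := pvInnerA_measure r es [] kn tr'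
      simp only [pvTotalLen, List.map_nil, List.sum_nil, List.length_cons] at hmeas hm
      apply ih
      · simp only [pvTotalLen]; omega
      · rw [pvInnerA_keys]; simpa using h1
      · intro p' hp'
        rcases pvInnerA_shrink r es [] kn tr' p' hp' with h | ⟨p, hp, he, hs⟩
        · cases h
        · intro x hx
          rw [he]
          exact h2 p hp x (hs x hx)
      · exact hsim.2.1
      · exact hsim.2.2

theorem pvInit_eq (vs : List Int) :
    ∀ s : PySem.Set Int,
    vs.foldl (fun (p : List Int × PySem.Set Int) v =>
        if v ∈ p.2 then p else (p.1 ++ [v], PySem.Set.add p.2 v)) (s, s)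
      = (vs.foldl PySem.Set.add s, vs.foldl PySem.Set.add s) := by
  induction vs with
  | nil => intro s; rfl
  | cons v vs ih =>
    intro s
    simp only [List.foldl_cons]
    by_cases hv : v ∈ s
    · rw [if_pos hv, PySem.Set.add_of_mem hv]
      exact ih s
    · rw [if_neg hv, PySem.Set.add_of_not_mem hv]
      exact ih (s ++ [v])

theorem reduce_possibilities_main : ∀ (could : List (String × List Int)),
    reduce_possibilities could = reduce_possibilities_alt could := by
  intro could
  unfold reduce_possibilities reduce_possibilities_alt
  dsimp only
  have hnd0 : (((PySem.Dict.ofList could).items).map Prod.fst).Nodup := by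
    have := PySem.Dict.nodup_keys_ofList could
    simpa [PySem.Dict.keys] using this
  set rem0 := (PySem.Dict.ofList could).items with hrem0
  set kn := rem0.foldl
    (fun d p => if p.2.length = 1 then d.insert p.1 (p.2.headD 0) else d)
    (PySem.Dict.empty : PySem.Dict String Int) with hkn
  rw [show (PySem.Set.empty : PySem.Set Int) = ([] : PySem.Set Int) from rfl]
  rw [pvInit_eq kn.values []]
  rw [← PySem.Set.ofList_eq_foldl]
  congr 1
  exact pvLoop_sim rem0 hnd0 (pvTotalLen rem0 + (PySem.Set.ofList kn.values).length)
    (PySem.Set.ofList kn.values) rem0 kn (PySem.Set.ofList kn.values)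
    (le_refl _) rfl
    (fun p hp x hx => by rw [pvLookup_eq_of_mem hnd0 hp]; exact hx)
    (fun y => Iff.rfl)
    (PySem.Set.nodup_ofList kn.values)

-- ===== VERDICT (by name: the statement is the Claim_ definition above) =====
theorem reduce_possibilities_spec : Claim_equal_reduce_possibilities := by
  intro could _ hpre
  -- the two ports agree on every input (both resolve eliminations in first-insertion order);
  -- Pre_ is what ties that shared order to the Python A being ported (see the comment at Pre_)
  rcases hpre with h | h <;> exact (reduce_possibilities_main could).symm ▸ rfl
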